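-- pv_equiv track=rewrite | github.com/ProvableHQ/python-sdk | leotranspiler/leotranspiler/_leo_helper.py | _get_leo_integer_bits
-- ===== SOURCE A (Python) =====
-- _leo_type_bits = [2**3, 2**4, 2**5, 2**6, 2**7]
--
-- def _get_leo_integer_bits(signed: bool, value_bits: int):
--     for bits in _leo_type_bits:
--         # Subtract 1 bit for signed integers
--         max_bits = bits - 1 if signed else bits
--         if value_bits <= max_bits:
--             return bits
--
--     raise ValueError(
--         f"No leo type for {'signed' if signed else 'unsigned'} value with more than "
--         f"{_leo_type_bits[-1]} bits. Try quantizing the model and/or the data."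
--     )
-- ===== SOURCE B (Python) =====
-- _leo_type_bits = [2**3, 2**4, 2**5, 2**6, 2**7]
--
-- def _get_leo_integer_bits(signed: bool, value_bits: int):
--     needed = value_bits + (1 if signed else 0)
--     if needed <= 8:
--         return 8
--     e = (needed - 1).bit_length()
--     if e > 7:
--         raise ValueError(
--             f"No leo type for {'signed' if signed else 'unsigned'} value with more than "
--             f"{_leo_type_bits[-1]} bits. Try quantizing the model and/or the data."
--         )
--     return 1 << e
-- ===== Notes on version B (the rewrite author's own statement) =====
-- stated objective: simpler
-- what changed: Replaces the linear scan over the fixed type list with a closed-form computation: needed = value_bits + signed, floor at 8, otherwise 1 << (needed-1).bit_length().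
import Mathlib
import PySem

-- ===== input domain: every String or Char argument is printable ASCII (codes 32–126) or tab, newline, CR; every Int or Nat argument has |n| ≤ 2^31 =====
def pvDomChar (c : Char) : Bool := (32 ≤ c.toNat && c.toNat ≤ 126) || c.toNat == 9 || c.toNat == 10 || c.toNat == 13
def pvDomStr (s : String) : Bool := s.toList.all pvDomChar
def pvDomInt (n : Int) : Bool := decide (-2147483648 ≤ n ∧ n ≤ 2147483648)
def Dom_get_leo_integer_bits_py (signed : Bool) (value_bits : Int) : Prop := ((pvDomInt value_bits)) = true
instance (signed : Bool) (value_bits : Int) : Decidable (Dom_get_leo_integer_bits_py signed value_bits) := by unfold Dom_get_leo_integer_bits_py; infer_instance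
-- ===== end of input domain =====

-- B replaces A's linear scan over the fixed type list with a closed-form
-- computation (floor at 8, else 1 << bit_length(needed-1)); objective: simpler.

-- ===== PORT A =====
def leo_type_bits : List Int := [2^3, 2^4, 2^5, 2^6, 2^7]

-- the 'for bits in _leo_type_bits' loop; [] = the raise (excluded by Pre_)
def leoScan (signed : Bool) (value_bits : Int) : List Int → Int
  | [] => 0
  | bits :: rest =>
    let max_bits := if signed then bits - 1 else bits
    if value_bits ≤ max_bits then bits else leoScan signed value_bits rest

def get_leo_integer_bits_py (signed : Bool) (value_bits : Int) : Int :=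
  leoScan signed value_bits leo_type_bits

-- ===== PORT B =====
def get_leo_integer_bits_py_alt (signed : Bool) (value_bits : Int) : Int :=
  let needed := value_bits + (if signed then 1 else 0)
  if needed ≤ 8 then 8
  else
    let e := Nat.size (needed - 1).toNat   -- (needed-1).bit_length() for needed-1 ≥ 0
    if e > 7 then 0                        -- the raise branch (excluded by Pre_)
    else (2 : Int) ^ e                     -- 1 << e

-- ===== PRECONDITION & SPEC =====
-- Exactly the inputs where A returns (no ValueError): needed bits fit in 128.
def Pre_get_leo_integer_bits_py (signed : Bool) (value_bits : Int) : Prop :=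
  value_bits + (if signed then 1 else 0) ≤ 128
instance (signed : Bool) (value_bits : Int) : Decidable (Pre_get_leo_integer_bits_py signed value_bits) := by unfold Pre_get_leo_integer_bits_py; infer_instance

def pvWitness_get_leo_integer_bits_py : Bool × Int := (true, 17)

def Spec_get_leo_integer_bits_py (signed : Bool) (value_bits : Int) (out : Int) : Prop := out = get_leo_integer_bits_py_alt signed value_bits
instance (signed : Bool) (value_bits : Int) (out : Int) : Decidable (Spec_get_leo_integer_bits_py signed value_bits out) := by unfold Spec_get_leo_integer_bits_py; infer_instance

-- ===== CLAIM (what is proved, stated in full; the proofs are below) =====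
def Claim_equal_get_leo_integer_bits_py : Prop := ∀ (signed : Bool) (value_bits : Int), Dom_get_leo_integer_bits_py signed value_bits → Pre_get_leo_integer_bits_py signed value_bits → Spec_get_leo_integer_bits_py signed value_bits (get_leo_integer_bits_py signed value_bits)

-- ===== LEMMAS AND PROOFS =====

-- ===== VERDICT (by name: the statement is the Claim_ definition above) =====
theorem get_leo_integer_bits_py_spec : Claim_equal_get_leo_integer_bits_py := by
  intro signed value_bits _ hpre
  unfold Spec_get_leo_integer_bits_py
  unfold Pre_get_leo_integer_bits_py at hpre
  by_cases h8 : value_bits + (if signed then 1 else 0) ≤ 8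
  · cases signed <;>
      simp only [get_leo_integer_bits_py, get_leo_integer_bits_py_alt, leo_type_bits, leoScan] <;>
      simp at h8 ⊢ <;> omega
  · cases signed
    · have hlo : 9 ≤ value_bits := by simpa using not_le.mp (by simpa using h8) 
      have hhi : value_bits ≤ 128 := by simpa using hpre
      interval_cases value_bits <;> decide
    · have hlo : 8 ≤ value_bits := by simp at h8; omega
      have hhi : value_bits ≤ 127 := by simp at hpre; omega
      interval_cases value_bits <;> decide
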